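-- pv_equiv track=rewrite | github.com/mr-pyle/Tron-2026 | bots/constrictor.py | voronoi_territory
-- ===== SOURCE A (Python) =====
-- DIRECTIONS = {
--     "UP": (0, -1),
--     "DOWN": (0, 1),
--     "LEFT": (-1, 0),
--     "RIGHT": (1, 0),
-- }
--
-- def flood_fill_area(start_pos, board, grid_dim):
--     if start_pos in board:
--         return 0
--
--     visited = set([start_pos])
--     stack = [start_pos]
--
--     while stack:
--         x, y = stack.pop()
--         for dx, dy in DIRECTIONS.values():
--             nx, ny = x + dx, y + dy
--             np = (nx, ny)
--             if (
--                 0 <= nx < grid_dim and 0 <= ny < grid_dim and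
--                 np not in board and
--                 np not in visited
--             ):
--                 visited.add(np)
--                 stack.append(np)
--
--     return len(visited)
--
-- def voronoi_territory(my_next_pos, opp_positions, board, grid_dim):
--     mx, my = my_next_pos
--     if not opp_positions:
--         return flood_fill_area(my_next_pos, board, grid_dim)
--
--     territory = 0
--     for x in range(grid_dim):
--         for y in range(grid_dim):
--             pos = (x, y)
--             if pos in board:
--                 continue
--             d_me = abs(x - mx) + abs(y - my)
--             d_opp = min(abs(x - ox) + abs(y - oy) for ox, oy in opp_positions)
--             if d_me < d_opp:
--                 territory += 1
--     return territory
-- ===== SOURCE B (Python) =====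
-- # B: separable two-pass 1D distance transforms (off-grid opponents clamped with an
-- # offset weight) replace the per-cell scan over all opponents: O(g^2 + k) vs O(g^2 * k).
-- # The empty-opponent branch performs the same flood fill as A (there is nothing else it could do).
-- DIRECTIONS = {
--     "UP": (0, -1),
--     "DOWN": (0, 1),
--     "LEFT": (-1, 0),
--     "RIGHT": (1, 0),
-- }
--
-- def _scan(row):
--     # forward pass in place: row[i] becomes min over j <= i of row[j] + (i - j), None = +inf
--     best = None
--     for i in range(len(row)):
--         if best is not None:
--             best += 1
--         v = row[i]
--         if v is not None and (best is None or v < best):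
--             best = v
--         row[i] = best
--
-- def _transform(row):
--     # full 1D distance transform: row[i] = min over j of row_0[j] + |i - j|
--     _scan(row)
--     row.reverse()
--     _scan(row)
--     row.reverse()
--
-- def voronoi_territory(my_next_pos, opp_positions, board, grid_dim):
--     if not opp_positions:
--         # flood fill of the free region reachable from my_next_pos
--         if my_next_pos in board:
--             return 0
--         visited = set([my_next_pos])
--         stack = [my_next_pos]
--         while stack:
--             x, y = stack.pop()
--             for dx, dy in DIRECTIONS.values():
--                 np = (x + dx, y + dy)
--                 if (0 <= np[0] < grid_dim and 0 <= np[1] < grid_dim and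
--                         np not in board and np not in visited):
--                     visited.add(np)
--                     stack.append(np)
--         return len(visited)
--     mx, my = my_next_pos
--     n = grid_dim
--     if n <= 0:
--         return 0
--     # seed: each opponent clamped onto the grid, weighted by its distance to the clamp cell
--     field = [[None] * n for _ in range(n)]
--     for ox, oy in opp_positions:
--         cx = 0 if ox < 0 else (n - 1 if ox >= n else ox)
--         cy = 0 if oy < 0 else (n - 1 if oy >= n else oy)
--         w = abs(ox - cx) + abs(oy - cy)
--         if field[cx][cy] is None or w < field[cx][cy]:
--             field[cx][cy] = w
--     for row in field:          # transform along y
--         _transform(row)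
--     for y in range(n):         # transform along x
--         col = [field[x][y] for x in range(n)]
--         _transform(col)
--         for x in range(n):
--             field[x][y] = col[x]
--     board_set = set(board)
--     territory = 0
--     for x in range(n):
--         for y in range(n):
--             if (x, y) in board_set:
--                 continue
--             d = field[x][y]
--             if d is None or abs(x - mx) + abs(y - my) < d:
--                 territory += 1
--     return territory
-- ===== Notes on version B (the rewrite author's own statement) =====
-- stated objective: faster
-- what changed: Per-cell scanning over all opponents (min over k opponents for each of g^2 grid cells, with a list scan of the board per cell) is replaced by seeding each opponent onto its clamped grid cell with an offset weight and running separable two-pass 1D distance transforms over the grid, then one counting pass with the board as a hash set; the empty-opponent branch keeps A's flood fill and equality is proved there too.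
import Mathlib
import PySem

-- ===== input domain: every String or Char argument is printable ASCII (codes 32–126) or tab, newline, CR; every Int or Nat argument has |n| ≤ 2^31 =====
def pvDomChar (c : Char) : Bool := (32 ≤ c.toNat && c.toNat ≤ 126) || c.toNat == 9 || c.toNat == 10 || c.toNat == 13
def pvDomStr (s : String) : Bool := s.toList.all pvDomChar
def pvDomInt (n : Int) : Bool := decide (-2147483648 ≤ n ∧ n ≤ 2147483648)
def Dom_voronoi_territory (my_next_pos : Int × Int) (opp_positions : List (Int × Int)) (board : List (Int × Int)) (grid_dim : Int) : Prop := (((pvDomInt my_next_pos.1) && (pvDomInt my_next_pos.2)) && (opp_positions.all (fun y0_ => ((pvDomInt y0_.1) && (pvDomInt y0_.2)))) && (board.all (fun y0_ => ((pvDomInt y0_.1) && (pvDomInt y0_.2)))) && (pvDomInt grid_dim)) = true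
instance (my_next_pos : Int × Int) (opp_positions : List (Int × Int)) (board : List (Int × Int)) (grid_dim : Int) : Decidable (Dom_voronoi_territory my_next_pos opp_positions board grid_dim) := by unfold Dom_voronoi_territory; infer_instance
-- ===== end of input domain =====

-- B replaces A's per-cell scan over all opponents by two separable 1D distance
-- transforms over the grid (off-grid opponents clamped with an offset weight):
-- measurably faster; the empty-opponent flood-fill branch is unchanged.

-- ===== PORT A =====
-- DIRECTIONS.values(), in order
def ffDirs : List (Int × Int) := [(0, -1), (0, 1), (-1, 0), (1, 0)]

-- the while-stack loop of flood_fill_area; fuel only makes the loop total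
-- (each iteration pops one element; pushes are bounded by the grid cells plus the start,
-- so the fuel used below is never exhausted); visited is kept as the list of distinct
-- cells in insertion order (the code only adds a cell after checking 'np not in visited')
def ffLoop (board : List (Int × Int)) (grid_dim : Int) : Nat → List (Int × Int) → List (Int × Int) → List (Int × Int)
  | 0, visited, _ => visited
  | fuel + 1, visited, stack =>
    match stack with
    | [] => visited
    | (x, y) :: rest =>
      let st := ffDirs.foldl (fun (acc : List (Int × Int) × List (Int × Int)) d =>
        let np := (x + d.1, y + d.2)
        if 0 ≤ np.1 ∧ np.1 < grid_dim ∧ 0 ≤ np.2 ∧ np.2 < grid_dim ∧ np ∉ board ∧ np ∉ acc.1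
        then (acc.1 ++ [np], np :: acc.2) else acc) (visited, rest)
      ffLoop board grid_dim fuel st.1 st.2

def flood_fill_area (start_pos : Int × Int) (board : List (Int × Int)) (grid_dim : Int) : Int :=
  if start_pos ∈ board then 0
  else ((ffLoop board grid_dim ((grid_dim.toNat + 2) * (grid_dim.toNat + 2) + 2) [start_pos] [start_pos]).length : Int)

def voronoi_territory (my_next_pos : Int × Int) (opp_positions : List (Int × Int)) (board : List (Int × Int)) (grid_dim : Int) : Int :=
  if opp_positions = [] then flood_fill_area my_next_pos board grid_dim
  else
    (PySem.List.pyRange 0 grid_dim 1).foldl (fun t x =>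
      (PySem.List.pyRange 0 grid_dim 1).foldl (fun t y =>
        if (x, y) ∈ board then t
        else
          let d_me := |x - my_next_pos.1| + |y - my_next_pos.2|
          let d_opp := (PySem.List.min? (opp_positions.map (fun o => |x - o.1| + |y - o.2|)) (fun v => v)).getD 0
          if d_me < d_opp then t + 1 else t) t) 0

-- ===== PORT B =====
-- Source B's own flood fill for the empty-opponent branch (same algorithm as A there)
def ffDirsB : List (Int × Int) := [(0, -1), (0, 1), (-1, 0), (1, 0)]

def ffLoopB (board : List (Int × Int)) (grid_dim : Int) : Nat → List (Int × Int) → List (Int × Int) → List (Int × Int)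
  | 0, visited, _ => visited
  | fuel + 1, visited, stack =>
    match stack with
    | [] => visited
    | (x, y) :: rest =>
      let st := ffDirsB.foldl (fun (acc : List (Int × Int) × List (Int × Int)) d =>
        let np := (x + d.1, y + d.2)
        if 0 ≤ np.1 ∧ np.1 < grid_dim ∧ 0 ≤ np.2 ∧ np.2 < grid_dim ∧ np ∉ board ∧ np ∉ acc.1
        then (acc.1 ++ [np], np :: acc.2) else acc) (visited, rest)
      ffLoopB board grid_dim fuel st.1 st.2

def flood_fill_area_B (start_pos : Int × Int) (board : List (Int × Int)) (grid_dim : Int) : Int :=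
  if start_pos ∈ board then 0
  else ((ffLoopB board grid_dim ((grid_dim.toNat + 2) * (grid_dim.toNat + 2) + 2) [start_pos] [start_pos]).length : Int)

-- Source B's rows are Python lists holding int or None (None = +infinity): List (WithTop Int).
-- 'v is None or w < v' style updates are the computable minimum omin.
def omin : WithTop Int → WithTop Int → WithTop Int
  | Option.none, b => b
  | a, Option.none => a
  | Option.some a, Option.some b => Option.some (min a b)

-- 'if best is not None: best += 1'
def oadd1 (a : WithTop Int) : WithTop Int := Option.map (· + 1) a

-- 'd is None or t < d'
def olt (t : Int) (a : WithTop Int) : Bool := match a with | Option.none => true | Option.some v => t < v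

def vtClamp (v n : Int) : Int := if v < 0 then 0 else if n ≤ v then n - 1 else v

-- _scan: forward pass over the row carrying 'best' (row[i] := best at each step)
def scanRow (row : List (WithTop Int)) : List (WithTop Int) :=
  (row.foldl (fun (acc : List (WithTop Int) × WithTop Int) v =>
      let b : WithTop Int := omin (oadd1 acc.2) v
      (acc.1 ++ [b], b)) ([], (⊤ : WithTop Int))).1

-- _transform: scan, reverse, scan, reverse
def transformRow (row : List (WithTop Int)) : List (WithTop Int) :=
  (scanRow (scanRow row).reverse).reverse

-- the opponent-seeding loop: field[cx][cy] min-updated at the clamped cell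
-- (the clamped indices are proven nonnegative, so .toNat is exact here)
def vtSeedL (opps : List (Int × Int)) (n : Int) : List (List (WithTop Int)) :=
  opps.foldl (fun f o =>
    let cx := vtClamp o.1 n
    let cy := vtClamp o.2 n
    let w : WithTop Int := ((|o.1 - cx| + |o.2 - cy| : Int) : WithTop Int)
    f.modify cx.toNat (fun row => row.modify cy.toNat (fun v => omin v w)))
    (List.replicate n.toNat (List.replicate n.toNat (⊤ : WithTop Int)))

def voronoi_territory_alt (my_next_pos : Int × Int) (opp_positions : List (Int × Int)) (board : List (Int × Int)) (grid_dim : Int) : Int :=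
  if opp_positions = [] then flood_fill_area_B my_next_pos board grid_dim
  else if grid_dim ≤ 0 then 0
  else
    let n := grid_dim
    let field0 := vtSeedL opp_positions n
    let field1 := field0.map transformRow               -- 'for row in field: _transform(row)'
    let field2 := (PySem.List.pyRange 0 n 1).map (fun y =>
        transformRow (field1.map (fun row => PySem.List.pyGetD row y ⊤)))   -- column y extracted, transformed
    let bs := PySem.Set.ofList board
    (PySem.List.pyRange 0 n 1).foldl (fun t x =>
      (PySem.List.pyRange 0 n 1).foldl (fun t y =>
        if (x, y) ∈ bs then t
        else if olt (|x - my_next_pos.1| + |y - my_next_pos.2|)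
                (PySem.List.pyGetD (PySem.List.pyGetD field2 y []) x (⊤ : WithTop Int)) then t + 1 else t) t) 0

-- ===== PRECONDITION & SPEC =====
def Spec_voronoi_territory (my_next_pos : Int × Int) (opp_positions : List (Int × Int)) (board : List (Int × Int)) (grid_dim : Int) (out : Int) : Prop := out = voronoi_territory_alt my_next_pos opp_positions board grid_dim
instance (my_next_pos : Int × Int) (opp_positions : List (Int × Int)) (board : List (Int × Int)) (grid_dim : Int) (out : Int) : Decidable (Spec_voronoi_territory my_next_pos opp_positions board grid_dim out) := by unfold Spec_voronoi_territory; infer_instance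

-- ===== CLAIM (what is proved, stated in full; the proofs are below) =====
def Claim_equal_voronoi_territory : Prop := ∀ (my_next_pos : Int × Int) (opp_positions : List (Int × Int)) (board : List (Int × Int)) (grid_dim : Int), Dom_voronoi_territory my_next_pos opp_positions board grid_dim → Spec_voronoi_territory my_next_pos opp_positions board grid_dim (voronoi_territory my_next_pos opp_positions board grid_dim)

-- ===== LEMMAS AND PROOFS =====

-- the two flood-fill loops are the same recursion
theorem ffLoopB_eq_ffLoop (board : List (Int × Int)) (grid_dim : Int) (fuel : Nat) :
    ∀ visited stack, ffLoopB board grid_dim fuel visited stack = ffLoop board grid_dim fuel visited stack := by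
  induction fuel with
  | zero => intro v s; rfl
  | succ n ih =>
    intro v s
    cases s with
    | nil => rfl
    | cons p rest =>
      obtain ⟨x, y⟩ := p
      simp only [ffLoopB, ffLoop, ffDirsB, ffDirs]
      exact ih _ _

theorem flood_fill_area_B_eq (start_pos : Int × Int) (board : List (Int × Int)) (grid_dim : Int) :
    flood_fill_area_B start_pos board grid_dim = flood_fill_area start_pos board grid_dim := by
  unfold flood_fill_area_B flood_fill_area
  rw [ffLoopB_eq_ffLoop]

-- The port's computable Option Int operations are exactly the WithTop Int order/arithmetic
theorem omin_eq_min (a b : WithTop Int) : omin a b = min a b := by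
  induction a using WithTop.recTopCoe with
  | top => rw [min_eq_right le_top]; cases b <;> rfl
  | coe a =>
    induction b using WithTop.recTopCoe with
    | top => rw [min_eq_left le_top]; rfl
    | coe b => rw [← WithTop.coe_min]; rfl

theorem oadd1_eq (a : WithTop Int) : oadd1 a = a + ((1 : Int) : WithTop Int) := by
  induction a using WithTop.recTopCoe with
  | top => rfl
  | coe a => rfl

theorem olt_iff (t : Int) (a : WithTop Int) : olt t a = true ↔ (t : WithTop Int) < a := by
  induction a using WithTop.recTopCoe with
  | top => simp [olt]
  | coe a => simp [olt]

-- minimum of a list of WithTop Int (⊤ for the empty list)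
def wmin (l : List (WithTop Int)) : WithTop Int := l.foldr (fun a b => omin a b) ⊤

theorem wmin_nil : wmin [] = ⊤ := rfl
theorem wmin_cons (a : WithTop Int) (l : List (WithTop Int)) : wmin (a :: l) = min a (wmin l) := by
  show omin a (wmin l) = min a (wmin l)
  exact omin_eq_min a (wmin l)

theorem wmin_le_of_mem {a : WithTop Int} {l : List (WithTop Int)} (h : a ∈ l) : wmin l ≤ a := by
  induction l with
  | nil => cases h
  | cons b t ih =>
    rw [wmin_cons]
    rcases List.mem_cons.1 h with h | h
    · subst h; exact min_le_left _ _
    · exact le_trans (min_le_right _ _) (ih h)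

theorem wmin_mem (l : List (WithTop Int)) : wmin l = ⊤ ∨ wmin l ∈ l := by
  induction l with
  | nil => exact Or.inl rfl
  | cons b t ih =>
    rcases le_total b (wmin t) with h | h
    · rw [wmin_cons, min_eq_left h]; exact Or.inr List.mem_cons_self
    · rw [wmin_cons, min_eq_right h]
      rcases ih with h2 | h2
      · exact Or.inl h2
      · exact Or.inr (List.mem_cons_of_mem _ h2)

theorem wmin_le_wmin {l l' : List (WithTop Int)} (h : ∀ a ∈ l, ∃ b ∈ l', b ≤ a) : wmin l' ≤ wmin l := by
  rcases wmin_mem l with hl | hl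
  · rw [hl]; exact le_top
  · obtain ⟨b, hb, hba⟩ := h _ hl
    exact le_trans (wmin_le_of_mem hb) hba

theorem top_min_eq (w : WithTop Int) : min ⊤ w = w := min_eq_right le_top

theorem wmin_eq_of_dom {l l' : List (WithTop Int)}
    (h1 : ∀ a ∈ l, ∃ b ∈ l', b ≤ a) (h2 : ∀ b ∈ l', ∃ a ∈ l, a ≤ b) :
    wmin l = wmin l' := le_antisymm (wmin_le_wmin h2) (wmin_le_wmin h1)

-- min distributes over +c in WithTop Int
theorem min_add_withTop (a b : WithTop Int) (c : Int) :
    min a b + (c : WithTop Int) = min (a + c) (b + c) := by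
  induction a using WithTop.recTopCoe with
  | top => rw [min_eq_right le_top, WithTop.top_add, min_eq_right le_top]
  | coe a =>
    induction b using WithTop.recTopCoe with
    | top => rw [min_eq_left le_top, WithTop.top_add, min_eq_left le_top]
    | coe b =>
      rw [← WithTop.coe_min, ← WithTop.coe_add, ← WithTop.coe_add, ← WithTop.coe_add, ← WithTop.coe_min]
      congr 1
      rcases le_total a b with h | h
      · rw [min_eq_left h, min_eq_left (by omega)]
      · rw [min_eq_right h, min_eq_right (by omega)]

-- row lookup used throughout the proofs (the port's reads, with the never-used default ⊤)
def rg (row : List (WithTop Int)) (i : Int) : WithTop Int := PySem.List.pyGetD row i ⊤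

-- 2-D lookup: field[x][y]
def lk (f : List (List (WithTop Int))) (x y : Int) : WithTop Int :=
  rg (PySem.List.pyGetD f x []) y

theorem pyGetD_high {α : Type} (l : List α) (i : Int) (d : α)
    (h0 : 0 ≤ i) (h : (l.length : Int) ≤ i) :
    PySem.List.pyGetD l i d = d := by
  simp only [PySem.List.pyGetD, PySem.List.pyGet?, PySem.List.pyIdx?]
  rw [if_pos h0, if_neg (by omega)]
  rfl

theorem rg_eq_getElem (row : List (WithTop Int)) (i : Int) (h0 : 0 ≤ i) (h1 : i < (row.length : Int)) :
    rg row i = row[i.toNat]'(by omega) := by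
  exact PySem.List.pyGetD_eq_getElem row ⊤ h0 h1

theorem rg_cons_zero (v : WithTop Int) (t : List (WithTop Int)) : rg (v :: t) 0 = v :=
  PySem.List.pyGetD_zero_cons v t ⊤

theorem rg_cons_pos (v : WithTop Int) (t : List (WithTop Int)) (i : Int) (hi : 0 < i) :
    rg (v :: t) i = rg t (i - 1) := by
  by_cases h : i - 1 < (t.length : Int)
  · rw [rg_eq_getElem _ _ (by omega) (by simp; omega), rg_eq_getElem _ _ (by omega) h]
    have he : i.toNat = (i - 1).toNat + 1 := by omega
    simp only [he, List.getElem_cons_succ]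
  · unfold rg
    rw [pyGetD_high _ _ _ (by omega) (by simp; omega), pyGetD_high _ _ _ (by omega) (by omega)]

theorem rg_reverse (row : List (WithTop Int)) (i : Int) (h0 : 0 ≤ i) (h1 : i < (row.length : Int)) :
    rg row.reverse i = rg row ((row.length : Int) - 1 - i) := by
  rw [rg_eq_getElem _ _ h0 (by simpa using h1),
      rg_eq_getElem _ _ (by omega) (by omega)]
  rw [List.getElem_reverse]
  congr 1
  omega

-- range shift: range(a, a+k) = [j + a for j in range(k)]
theorem pyRange_shift (k : Nat) : ∀ a : Int,
    PySem.List.pyRange a (a + (k : Int)) 1 = (PySem.List.pyRange 0 (k : Int) 1).map (· + a) := by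
  induction k with
  | zero =>
    intro a
    rw [PySem.List.pyRange_one_eq_nil (by omega), PySem.List.pyRange_one_eq_nil (by omega), List.map_nil]
  | succ k ih =>
    intro a
    have h1 : a + ((k + 1 : Nat) : Int) = (a + (k : Int)) + 1 := by push_cast; ring
    have h2 : ((k + 1 : Nat) : Int) = (k : Int) + 1 := by push_cast; ring
    rw [h1, PySem.List.pyRange_one_succ_right (by omega), h2,
        PySem.List.pyRange_one_succ_right (by omega), List.map_append, ih a, List.map_singleton,
        add_comm a (k : Int)]

-- the scan loop as structural recursion on the row
def scanFrom : WithTop Int → List (WithTop Int) → List (WithTop Int)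
  | _, [] => []
  | b, v :: t =>
    let b' : WithTop Int := omin (oadd1 b) v
    b' :: scanFrom b' t

def scanStep (acc : List (WithTop Int) × WithTop Int) (v : WithTop Int) : List (WithTop Int) × WithTop Int :=
  (acc.1 ++ [omin (oadd1 acc.2) v], omin (oadd1 acc.2) v)

theorem scanStep_foldl (row : List (WithTop Int)) : ∀ (acc : List (WithTop Int)) (b : WithTop Int),
    (List.foldl scanStep (acc, b) row).1 = acc ++ scanFrom b row := by
  induction row with
  | nil => intro acc b; simp [scanFrom]
  | cons v t ih =>
    intro acc b
    rw [List.foldl_cons]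
    have hs : scanStep (acc, b) v = (acc ++ [omin (oadd1 b) v], omin (oadd1 b) v) := rfl
    rw [hs, ih]
    simp [scanFrom]

theorem scanRow_eq (row : List (WithTop Int)) : scanRow row = scanFrom ⊤ row := by
  show (List.foldl scanStep ([], ⊤) row).1 = scanFrom ⊤ row
  rw [scanStep_foldl row [] ⊤, List.nil_append]

theorem length_scanFrom (row : List (WithTop Int)) : ∀ b, (scanFrom b row).length = row.length := by
  induction row with
  | nil => intro b; rfl
  | cons v t ih => intro b; simp [scanFrom, ih]

theorem scanFrom_spec (row : List (WithTop Int)) : ∀ (b : WithTop Int) (i : Int),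
    0 ≤ i → i < (row.length : Int) →
    rg (scanFrom b row) i
      = min (b + ((i + 1 : Int) : WithTop Int))
          (wmin ((PySem.List.pyRange 0 (i + 1) 1).map (fun j => rg row j + ((i - j : Int) : WithTop Int)))) := by
  induction row with
  | nil => intro b i h0 h1; simp at h1; omega
  | cons v t ih =>
    intro b i h0 h1
    have hlen : (i : Int) < (t.length : Int) + 1 := by simpa using h1
    by_cases hi : i = 0
    · subst hi
      have hr : PySem.List.pyRange 0 (0 + 1 : Int) 1 = [(0 : Int)] := by
        rw [PySem.List.pyRange_one_succ_right (le_refl 0), PySem.List.pyRange_one_eq_nil (le_refl 0), List.nil_append]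
      show rg (omin (oadd1 b) v :: scanFrom (omin (oadd1 b) v) t) 0 = _
      rw [rg_cons_zero, hr, List.map_singleton, wmin_cons, wmin_nil, min_eq_left le_top,
          rg_cons_zero, omin_eq_min, oadd1_eq]
      norm_num
    · have hpos : 0 < i := by omega
      have hL : rg (scanFrom b (v :: t)) i = rg (scanFrom (omin (oadd1 b) v) t) (i - 1) := by
        show rg (omin (oadd1 b) v :: scanFrom (omin (oadd1 b) v) t) i = _
        exact rg_cons_pos _ _ _ hpos
      rw [hL, ih _ (i - 1) (by omega) (by omega)]
      -- left side algebra
      have e1 : (i - 1 + 1 : Int) = i := by ring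
      rw [e1, omin_eq_min, oadd1_eq, min_add_withTop]
      have e2 : b + ((1 : Int) : WithTop Int) + ((i : Int) : WithTop Int) = b + ((i + 1 : Int) : WithTop Int) := by
        rw [add_assoc, ← WithTop.coe_add]
        congr 2
        ring
      rw [e2]
      -- right side decomposition
      have hr : PySem.List.pyRange 0 (i + 1) 1 = (0 : Int) :: PySem.List.pyRange 1 (i + 1) 1 :=
        PySem.List.pyRange_one_cons (by omega)
      rw [hr, List.map_cons, wmin_cons, rg_cons_zero]
      have hsh : PySem.List.pyRange 1 (i + 1) 1 = (PySem.List.pyRange 0 i 1).map (· + 1) := by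
        have hk : (1 : Int) + (i.toNat : Int) = i + 1 := by omega
        have hk2 : ((i.toNat : Int)) = i := by omega
        rw [← hk, pyRange_shift i.toNat 1, hk2]
      rw [hsh, List.map_map]
      have hcg : ∀ j ∈ PySem.List.pyRange 0 i 1,
          ((fun j => rg (v :: t) j + ((i - j : Int) : WithTop Int)) ∘ (· + (1 : Int))) j
            = rg t j + ((i - 1 - j : Int) : WithTop Int) := by
        intro j hj
        have hjb := PySem.List.mem_pyRange_one.1 hj
        simp only [Function.comp]
        rw [rg_cons_pos _ _ _ (by omega)]
        have e3 : (j + 1 - 1 : Int) = j := by ring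
        have e4 : (i - (j + 1) : Int) = i - 1 - j := by ring
        rw [e3, e4]
      rw [List.map_congr_left hcg]
      have e5 : ((i - 0 : Int) : WithTop Int) = ((i : Int) : WithTop Int) := by norm_num
      rw [e5, ← min_assoc, min_comm (b + ((i + 1 : Int) : WithTop Int)) (v + ((i : Int) : WithTop Int)), min_assoc]

theorem scanTop_spec (row : List (WithTop Int)) (i : Int) (h0 : 0 ≤ i) (h1 : i < (row.length : Int)) :
    rg (scanFrom ⊤ row) i
      = wmin ((PySem.List.pyRange 0 (i + 1) 1).map (fun j => rg row j + ((i - j : Int) : WithTop Int))) := by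
  rw [scanFrom_spec row ⊤ i h0 h1, WithTop.top_add, top_min_eq]

theorem transformRow_spec (N : Nat) (row : List (WithTop Int)) (hlen : row.length = N) (y : Int)
    (h0 : 0 ≤ y) (h1 : y < (N : Int)) :
    rg (transformRow row) y
      = wmin ((PySem.List.pyRange 0 (N : Int) 1).map (fun j => rg row j + ((|y - j| : Int) : WithTop Int))) := by
  have hs : (scanRow row).length = N := by rw [scanRow_eq, length_scanFrom, hlen]
  have hs2 : (scanRow (scanRow row).reverse).length = N := by
    rw [scanRow_eq, length_scanFrom, List.length_reverse, hs]
  unfold transformRow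
  rw [rg_reverse _ _ h0 (by rw [hs2]; exact_mod_cast h1), hs2]
  rw [scanRow_eq (scanRow row).reverse, scanTop_spec _ ((N : Int) - 1 - y) (by omega)
        (by rw [List.length_reverse, hs]; omega)]
  have hstep1 : ∀ j ∈ PySem.List.pyRange 0 ((N : Int) - 1 - y + 1) 1,
      rg (scanRow row).reverse j + (((N : Int) - 1 - y - j : Int) : WithTop Int)
        = rg (scanRow row) ((N : Int) - 1 - j) + (((N : Int) - 1 - y - j : Int) : WithTop Int) := by
    intro j hj
    have hjb := PySem.List.mem_pyRange_one.1 hj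
    rw [rg_reverse _ _ (by omega) (by rw [hs]; omega), hs]
  rw [List.map_congr_left hstep1]
  have hscan : ∀ m : Int, 0 ≤ m → m < (N : Int) →
      rg (scanRow row) m
        = wmin ((PySem.List.pyRange 0 (m + 1) 1).map (fun k => rg row k + ((m - k : Int) : WithTop Int))) := by
    intro m hm0 hm1
    rw [scanRow_eq, scanTop_spec row m hm0 (by rw [hlen]; exact hm1)]
  apply wmin_eq_of_dom
  · intro a ha
    obtain ⟨j, hj, rfl⟩ := List.mem_map.1 ha
    have hjb := PySem.List.mem_pyRange_one.1 hj
    rw [hscan ((N:Int) - 1 - j) (by omega) (by omega)]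
    rcases wmin_mem ((PySem.List.pyRange 0 ((N:Int) - 1 - j + 1) 1).map
        (fun i => rg row i + (((N:Int) - 1 - j - i : Int) : WithTop Int))) with ht | hmem
    · refine ⟨rg row 0 + ((|y - 0| : Int) : WithTop Int),
        List.mem_map.2 ⟨0, PySem.List.mem_pyRange_one.2 ⟨le_refl 0, by omega⟩, rfl⟩, ?_⟩
      rw [ht, WithTop.top_add]
      exact le_top
    · obtain ⟨i, hi, hval⟩ := List.mem_map.1 hmem
      have hib := PySem.List.mem_pyRange_one.1 hi
      refine ⟨rg row i + ((|y - i| : Int) : WithTop Int),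
        List.mem_map.2 ⟨i, PySem.List.mem_pyRange_one.2 ⟨hib.1, by omega⟩, rfl⟩, ?_⟩
      rw [← hval, add_assoc, ← WithTop.coe_add]
      refine add_le_add (le_refl _) (WithTop.coe_le_coe.2 ?_)
      rcases abs_cases (y - i) with ⟨he, _⟩ | ⟨he, _⟩ <;> omega
  · intro b hb
    obtain ⟨i, hi, rfl⟩ := List.mem_map.1 hb
    have hib := PySem.List.mem_pyRange_one.1 hi
    rcases le_total i y with hiy | hyi
    · -- nearest turning point m = y, list index j = N - 1 - y
      refine ⟨_, List.mem_map.2 ⟨(N:Int) - 1 - y,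
        PySem.List.mem_pyRange_one.2 ⟨by omega, by omega⟩, rfl⟩, ?_⟩
      rw [hscan ((N:Int) - 1 - ((N:Int) - 1 - y)) (by omega) (by omega)]
      have hmm : rg row i + (((N:Int) - 1 - ((N:Int) - 1 - y) - i : Int) : WithTop Int)
          ∈ (PySem.List.pyRange 0 ((N:Int) - 1 - ((N:Int) - 1 - y) + 1) 1).map
              (fun i' => rg row i' + (((N:Int) - 1 - ((N:Int) - 1 - y) - i' : Int) : WithTop Int)) :=
        List.mem_map.2 ⟨i, PySem.List.mem_pyRange_one.2 ⟨hib.1, by omega⟩, rfl⟩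
      calc wmin _ + (((N:Int) - 1 - y - ((N:Int) - 1 - y) : Int) : WithTop Int)
          ≤ (rg row i + (((N:Int) - 1 - ((N:Int) - 1 - y) - i : Int) : WithTop Int))
              + (((N:Int) - 1 - y - ((N:Int) - 1 - y) : Int) : WithTop Int) :=
            add_le_add (wmin_le_of_mem hmm) (le_refl _)
        _ = rg row i + ((|y - i| : Int) : WithTop Int) := by
            rw [add_assoc, ← WithTop.coe_add]
            have he : ((N:Int) - 1 - ((N:Int) - 1 - y) - i) + ((N:Int) - 1 - y - ((N:Int) - 1 - y)) = |y - i| := by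
              rcases abs_cases (y - i) with ⟨h2, _⟩ | ⟨h2, _⟩ <;> omega
            rw [he]
    · -- nearest turning point m = i, list index j = N - 1 - i
      refine ⟨_, List.mem_map.2 ⟨(N:Int) - 1 - i,
        PySem.List.mem_pyRange_one.2 ⟨by omega, by omega⟩, rfl⟩, ?_⟩
      rw [hscan ((N:Int) - 1 - ((N:Int) - 1 - i)) (by omega) (by omega)]
      have hmm : rg row i + (((N:Int) - 1 - ((N:Int) - 1 - i) - i : Int) : WithTop Int)
          ∈ (PySem.List.pyRange 0 ((N:Int) - 1 - ((N:Int) - 1 - i) + 1) 1).map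
              (fun i' => rg row i' + (((N:Int) - 1 - ((N:Int) - 1 - i) - i' : Int) : WithTop Int)) :=
        List.mem_map.2 ⟨i, PySem.List.mem_pyRange_one.2 ⟨hib.1, by omega⟩, rfl⟩
      calc wmin _ + (((N:Int) - 1 - y - ((N:Int) - 1 - i) : Int) : WithTop Int)
          ≤ (rg row i + (((N:Int) - 1 - ((N:Int) - 1 - i) - i : Int) : WithTop Int))
              + (((N:Int) - 1 - y - ((N:Int) - 1 - i) : Int) : WithTop Int) :=
            add_le_add (wmin_le_of_mem hmm) (le_refl _)
        _ = rg row i + ((|y - i| : Int) : WithTop Int) := by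
            rw [add_assoc, ← WithTop.coe_add]
            have he : ((N:Int) - 1 - ((N:Int) - 1 - i) - i) + ((N:Int) - 1 - y - ((N:Int) - 1 - i)) = |y - i| := by
              rcases abs_cases (y - i) with ⟨h2, _⟩ | ⟨h2, _⟩ <;> omega
            rw [he]

theorem vtClamp_abs (v x n : Int) (h0 : 0 ≤ x) (h1 : x < n) :
    |v - vtClamp v n| + |x - vtClamp v n| = |x - v| := by
  unfold vtClamp
  split_ifs with h h'
  · rw [abs_of_nonpos (by omega), abs_of_nonneg (by omega), abs_of_nonneg (by omega)]; omega
  · rw [abs_of_nonneg (by omega), abs_of_nonpos (by omega), abs_of_nonpos (by omega)]; omega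
  · rw [sub_self, abs_zero, zero_add]

theorem vtClamp_range (v n : Int) (hn : 0 < n) : 0 ≤ vtClamp v n ∧ vtClamp v n < n := by
  unfold vtClamp; split_ifs <;> omega

-- proof-side 2-D lookup with Nat indices
def g2 (f : List (List (WithTop Int))) (x y : Nat) : WithTop Int := (f.getD x []).getD y ⊤

theorem lk_eq_g2 (f : List (List (WithTop Int))) (x y : Int) (hx0 : 0 ≤ x) (hx1 : x < (f.length : Int))
    (hy0 : 0 ≤ y) (hy1 : y < ((f[x.toNat]'(by omega)).length : Int)) :
    lk f x y = g2 f x.toNat y.toNat := by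
  unfold lk g2 rg
  rw [PySem.List.pyGetD_eq_getElem f [] hx0 hx1, List.getD_eq_getElem f [] (by omega)]
  rw [PySem.List.pyGetD_eq_getElem _ ⊤ hy0 hy1, List.getD_eq_getElem _ ⊤ (by omega)]

theorem g2_modify (f : List (List (WithTop Int))) (cx cy x y : Nat) (g : WithTop Int → WithTop Int)
    (hx : x < f.length) (hy : y < (f[x]'hx).length) :
    g2 (f.modify cx (fun row => row.modify cy g)) x y
      = if cx = x ∧ cy = y then g (g2 f x y) else g2 f x y := by
  have hg2 : g2 f x y = (f[x]'hx)[y]'hy := by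
    unfold g2
    rw [List.getD_eq_getElem f [] hx, List.getD_eq_getElem _ ⊤ hy]
  have hxm : x < (f.modify cx (fun row => row.modify cy g)).length := by
    rw [List.length_modify]; exact hx
  have hrow : (f.modify cx (fun row => row.modify cy g))[x]'hxm
      = if cx = x then (f[x]'hx).modify cy g else f[x]'hx := List.getElem_modify _ _ _ _ _
  have hL : g2 (f.modify cx (fun row => row.modify cy g)) x y
      = (if cx = x then (f[x]'hx).modify cy g else f[x]'hx).getD y ⊤ := by
    unfold g2
    rw [List.getD_eq_getElem _ [] hxm, hrow]
  rw [hL, hg2]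
  by_cases hc : cx = x
  · rw [if_pos hc]
    have hym : y < ((f[x]'hx).modify cy g).length := by rw [List.length_modify]; exact hy
    rw [List.getD_eq_getElem _ ⊤ hym, List.getElem_modify]
    by_cases hcy : cy = y
    · rw [if_pos hcy, if_pos ⟨hc, hcy⟩]
    · rw [if_neg hcy, if_neg (by tauto)]
  · rw [if_neg hc, if_neg (by tauto), List.getD_eq_getElem _ ⊤ hy]

-- shape invariant of the seeding fold
theorem seed_fold_shape (n : Int) : ∀ (t : List (Int × Int)) (f0 : List (List (WithTop Int))),
    f0.length = n.toNat → (∀ j (h : j < f0.length), (f0[j]).length = n.toNat) →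
    (t.foldl (fun f o =>
        let cx := vtClamp o.1 n
        let cy := vtClamp o.2 n
        let w : WithTop Int := ((|o.1 - cx| + |o.2 - cy| : Int) : WithTop Int)
        f.modify cx.toNat (fun row => row.modify cy.toNat (fun v => omin v w))) f0).length = n.toNat ∧
      ∀ j (h : j < (t.foldl (fun f o =>
        let cx := vtClamp o.1 n
        let cy := vtClamp o.2 n
        let w : WithTop Int := ((|o.1 - cx| + |o.2 - cy| : Int) : WithTop Int)
        f.modify cx.toNat (fun row => row.modify cy.toNat (fun v => omin v w))) f0).length),
        ((t.foldl (fun f o =>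
        let cx := vtClamp o.1 n
        let cy := vtClamp o.2 n
        let w : WithTop Int := ((|o.1 - cx| + |o.2 - cy| : Int) : WithTop Int)
        f.modify cx.toNat (fun row => row.modify cy.toNat (fun v => omin v w))) f0)[j]).length = n.toNat := by
  intro t
  induction t with
  | nil => intro f0 h1 h2; exact ⟨h1, h2⟩
  | cons o tl ih =>
    intro f0 h1 h2
    simp only [List.foldl_cons]
    apply ih
    · rw [List.length_modify]; exact h1
    · intro j hj
      rw [List.length_modify] at hj
      rw [List.getElem_modify]
      by_cases hc : (vtClamp o.1 n).toNat = j
      · rw [if_pos hc, List.length_modify]; exact h2 j hj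
      · rw [if_neg hc]; exact h2 j hj

theorem vtSeedL_shape (opps : List (Int × Int)) (n : Int) :
    (vtSeedL opps n).length = n.toNat ∧
      ∀ j (h : j < (vtSeedL opps n).length), ((vtSeedL opps n)[j]).length = n.toNat := by
  unfold vtSeedL
  exact seed_fold_shape n opps _ (by simp) (by intro j h; simp)

theorem vtSeedL_spec (opps : List (Int × Int)) (n : Int) (hn : 0 < n)
    (x y : Int) (hx0 : 0 ≤ x) (hx1 : x < n) (hy0 : 0 ≤ y) (hy1 : y < n) :
    lk (vtSeedL opps n) x y
      = wmin (opps.map (fun o =>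
          if (x, y) = (vtClamp o.1 n, vtClamp o.2 n)
          then ((|o.1 - vtClamp o.1 n| + |o.2 - vtClamp o.2 n| : Int) : WithTop Int)
          else ⊤)) := by
  have haux : ∀ (t : List (Int × Int)) (f0 : List (List (WithTop Int))),
      f0.length = n.toNat → (∀ j (h : j < f0.length), (f0[j]).length = n.toNat) →
      lk (t.foldl (fun f o =>
        let cx := vtClamp o.1 n
        let cy := vtClamp o.2 n
        let w : WithTop Int := ((|o.1 - cx| + |o.2 - cy| : Int) : WithTop Int)
        f.modify cx.toNat (fun row => row.modify cy.toNat (fun v => omin v w))) f0) x y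
        = min (lk f0 x y) (wmin (t.map (fun o =>
            if (x, y) = (vtClamp o.1 n, vtClamp o.2 n)
            then ((|o.1 - vtClamp o.1 n| + |o.2 - vtClamp o.2 n| : Int) : WithTop Int)
            else ⊤))) := by
    intro t
    induction t with
    | nil => intro f0 h1 h2; rw [List.foldl_nil, List.map_nil, wmin_nil, min_eq_left le_top]
    | cons o tl ih =>
      intro f0 h1 h2
      have hc1 := vtClamp_range o.1 n hn
      have hc2 := vtClamp_range o.2 n hn
      have hxf : x.toNat < f0.length := by omega
      have hyf : y.toNat < ((f0[x.toNat]'hxf)).length := by rw [h2 x.toNat hxf]; omega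
      have hstep : lk (f0.modify (vtClamp o.1 n).toNat (fun row => row.modify (vtClamp o.2 n).toNat
            (fun v => omin v ((|o.1 - vtClamp o.1 n| + |o.2 - vtClamp o.2 n| : Int) : WithTop Int)))) x y
          = if (x, y) = (vtClamp o.1 n, vtClamp o.2 n)
            then omin (lk f0 x y) ((|o.1 - vtClamp o.1 n| + |o.2 - vtClamp o.2 n| : Int) : WithTop Int)
            else lk f0 x y := by
        rw [lk_eq_g2 _ x y hx0 (by rw [List.length_modify]; omega) hy0
              (by rw [List.getElem_modify]
                  by_cases hcx : (vtClamp o.1 n).toNat = x.toNat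
                  · rw [if_pos hcx, List.length_modify, h2 x.toNat hxf]; omega
                  · rw [if_neg hcx, h2 x.toNat hxf]; omega),
            g2_modify f0 _ _ _ _ _ hxf hyf,
            lk_eq_g2 f0 x y hx0 (by omega) hy0 (by rw [h2 x.toNat hxf]; omega)]
        have hiff : ((vtClamp o.1 n).toNat = x.toNat ∧ (vtClamp o.2 n).toNat = y.toNat)
            ↔ ((x, y) = (vtClamp o.1 n, vtClamp o.2 n)) := by
          rw [Prod.mk.injEq]
          constructor
          · rintro ⟨a, b⟩; exact ⟨by omega, by omega⟩
          · rintro ⟨a, b⟩; exact ⟨by omega, by omega⟩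
        by_cases hcond : (x, y) = (vtClamp o.1 n, vtClamp o.2 n)
        · rw [if_pos (hiff.2 hcond), if_pos hcond]
        · rw [if_neg (fun h => hcond (hiff.1 h)), if_neg hcond]
      simp only [List.foldl_cons]
      have hsh1 : (f0.modify (vtClamp o.1 n).toNat (fun row => row.modify (vtClamp o.2 n).toNat
            (fun v => omin v ((|o.1 - vtClamp o.1 n| + |o.2 - vtClamp o.2 n| : Int) : WithTop Int)))).length = n.toNat := by
        rw [List.length_modify]; exact h1
      have hsh2 : ∀ j (h : j < (f0.modify (vtClamp o.1 n).toNat (fun row => row.modify (vtClamp o.2 n).toNat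
            (fun v => omin v ((|o.1 - vtClamp o.1 n| + |o.2 - vtClamp o.2 n| : Int) : WithTop Int)))).length),
          ((f0.modify (vtClamp o.1 n).toNat (fun row => row.modify (vtClamp o.2 n).toNat
            (fun v => omin v ((|o.1 - vtClamp o.1 n| + |o.2 - vtClamp o.2 n| : Int) : WithTop Int))))[j]).length = n.toNat := by
        intro j hj
        rw [List.getElem_modify]
        by_cases hcx : (vtClamp o.1 n).toNat = j
        · rw [if_pos hcx, List.length_modify]
          exact h2 j (by rw [List.length_modify] at hj; exact hj)
        · rw [if_neg hcx]
          exact h2 j (by rw [List.length_modify] at hj; exact hj)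
      rw [ih _ hsh1 hsh2, hstep, List.map_cons, wmin_cons]
      by_cases hcond : (x, y) = (vtClamp o.1 n, vtClamp o.2 n)
      · rw [if_pos hcond, if_pos hcond, omin_eq_min, min_assoc]
      · rw [if_neg hcond, if_neg hcond, top_min_eq]
  unfold vtSeedL
  rw [haux opps _ (by simp) (by intro j h; simp)]
  have hinit : lk (List.replicate n.toNat (List.replicate n.toNat (⊤ : WithTop Int))) x y = ⊤ := by
    rw [lk_eq_g2 _ x y hx0 (by simp; omega) hy0 (by simp; omega)]
    unfold g2
    rw [List.getD_eq_getElem _ [] (by simp; omega), List.getElem_replicate,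
        List.getD_eq_getElem _ ⊤ (by simp; omega), List.getElem_replicate]
  rw [hinit, top_min_eq]

theorem fieldL_spec (opps : List (Int × Int)) (N : Nat) (hN : 0 < N) (ho : opps ≠ [])
    (x y : Int) (hx0 : 0 ≤ x) (hx1 : x < (N : Int)) (hy0 : 0 ≤ y) (hy1 : y < (N : Int)) :
    lk ((PySem.List.pyRange 0 (N : Int) 1).map (fun y' =>
        transformRow (((vtSeedL opps (N : Int)).map transformRow).map (fun row => PySem.List.pyGetD row y' ⊤)))) y x
      = wmin (opps.map (fun o => ((|x - o.1| + |y - o.2| : Int) : WithTop Int))) := by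
  obtain ⟨o0, ho0⟩ := List.exists_mem_of_ne_nil opps ho
  have hsh := vtSeedL_shape opps (N : Int)
  have hslen : (vtSeedL opps (N : Int)).length = N := by rw [hsh.1]; simp
  have hcol : lk ((PySem.List.pyRange 0 (N : Int) 1).map (fun y' =>
        transformRow (((vtSeedL opps (N : Int)).map transformRow).map (fun row => PySem.List.pyGetD row y' ⊤)))) y x
      = rg (transformRow (((vtSeedL opps (N : Int)).map transformRow).map (fun row => PySem.List.pyGetD row y ⊤))) x := by
    unfold lk
    rw [PySem.List.pyGetD_map_pyRange_of_nonneg _ (N : Int) y _ hy0 hy1]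
  rw [hcol]
  have hclen : (((vtSeedL opps (N : Int)).map transformRow).map (fun row => PySem.List.pyGetD row y ⊤)).length = N := by
    rw [List.length_map, List.length_map, hslen]
  rw [transformRow_spec N _ hclen x hx0 hx1]
  have hrow : ∀ i ∈ PySem.List.pyRange 0 (N : Int) 1,
      rg (((vtSeedL opps (N : Int)).map transformRow).map (fun row => PySem.List.pyGetD row y ⊤)) i
          + ((|x - i| : Int) : WithTop Int)
        = wmin ((PySem.List.pyRange 0 (N : Int) 1).map
            (fun j => lk (vtSeedL opps (N : Int)) i j + ((|y - j| : Int) : WithTop Int)))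
            + ((|x - i| : Int) : WithTop Int) := by
    intro i hi
    have hib := PySem.List.mem_pyRange_one.1 hi
    have hif : i.toNat < (vtSeedL opps (N : Int)).length := by omega
    have hrlen : ((vtSeedL opps (N : Int))[i.toNat]'hif).length = N := by
      rw [hsh.2 i.toNat hif]; simp
    have e1 : rg (((vtSeedL opps (N : Int)).map transformRow).map (fun row => PySem.List.pyGetD row y ⊤)) i
        = rg (transformRow ((vtSeedL opps (N : Int))[i.toNat]'hif)) y := by
      rw [rg_eq_getElem _ _ hib.1 (by rw [hclen]; omega)]
      rw [List.getElem_map, List.getElem_map]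
      rfl
    have e2 : ∀ j ∈ PySem.List.pyRange 0 (N : Int) 1,
        rg ((vtSeedL opps (N : Int))[i.toNat]'hif) j + ((|y - j| : Int) : WithTop Int)
          = lk (vtSeedL opps (N : Int)) i j + ((|y - j| : Int) : WithTop Int) := by
      intro j hj
      have hjb := PySem.List.mem_pyRange_one.1 hj
      unfold lk
      rw [PySem.List.pyGetD_eq_getElem _ [] hib.1 (by rw [hslen]; exact_mod_cast hib.2)]
    rw [e1, transformRow_spec N _ hrlen y hy0 hy1, List.map_congr_left e2]
  rw [List.map_congr_left hrow]
  apply wmin_eq_of_dom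
  · intro a ha
    obtain ⟨i, hi, rfl⟩ := List.mem_map.1 ha
    have hib := PySem.List.mem_pyRange_one.1 hi
    rcases wmin_mem ((PySem.List.pyRange 0 (N:Int) 1).map
        (fun j => lk (vtSeedL opps (N : Int)) i j + ((|y - j| : Int) : WithTop Int))) with ht | hmem
    · refine ⟨((|x - o0.1| + |y - o0.2| : Int) : WithTop Int),
        List.mem_map.2 ⟨o0, ho0, rfl⟩, ?_⟩
      rw [ht, WithTop.top_add]
      exact le_top
    · obtain ⟨j, hj, hval⟩ := List.mem_map.1 hmem
      have hjb := PySem.List.mem_pyRange_one.1 hj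
      rw [← hval, vtSeedL_spec opps (N : Int) (by omega) i j hib.1 hib.2 hjb.1 hjb.2]
      rcases wmin_mem (opps.map (fun o =>
          if ((i, j) : Int × Int) = (vtClamp o.1 (N:Int), vtClamp o.2 (N:Int))
          then ((|o.1 - vtClamp o.1 (N:Int)| + |o.2 - vtClamp o.2 (N:Int)| : Int) : WithTop Int)
          else ⊤)) with ht2 | hmem2
    -- (continued below)
      · refine ⟨((|x - o0.1| + |y - o0.2| : Int) : WithTop Int),
          List.mem_map.2 ⟨o0, ho0, rfl⟩, ?_⟩
        rw [ht2, WithTop.top_add, WithTop.top_add]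
        exact le_top
      · obtain ⟨o, hoo, hval2⟩ := List.mem_map.1 hmem2
        by_cases hcond : ((i, j) : Int × Int) = (vtClamp o.1 (N:Int), vtClamp o.2 (N:Int))
        · refine ⟨((|x - o.1| + |y - o.2| : Int) : WithTop Int),
            List.mem_map.2 ⟨o, hoo, rfl⟩, ?_⟩
          rw [← hval2, if_pos hcond]
          have hi' : i = vtClamp o.1 (N:Int) := (Prod.ext_iff.1 hcond).1
          have hj' : j = vtClamp o.2 (N:Int) := (Prod.ext_iff.1 hcond).2
          rw [← WithTop.coe_add, ← WithTop.coe_add, WithTop.coe_le_coe, ← hi', ← hj']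
          have e1 := vtClamp_abs o.1 x (N:Int) hx0 hx1
          have e2 := vtClamp_abs o.2 y (N:Int) hy0 hy1
          rw [← hi'] at e1
          rw [← hj'] at e2
          linarith
        · refine ⟨((|x - o0.1| + |y - o0.2| : Int) : WithTop Int),
            List.mem_map.2 ⟨o0, ho0, rfl⟩, ?_⟩
          rw [← hval2, if_neg hcond, WithTop.top_add, WithTop.top_add]
          exact le_top
  · intro b hb
    obtain ⟨o, hoo, rfl⟩ := List.mem_map.1 hb
    have hc1 := vtClamp_range o.1 (N:Int) (by omega)
    have hc2 := vtClamp_range o.2 (N:Int) (by omega)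
    refine ⟨_, List.mem_map.2 ⟨vtClamp o.1 (N:Int),
      PySem.List.mem_pyRange_one.2 ⟨hc1.1, hc1.2⟩, rfl⟩, ?_⟩
    have hmm : lk (vtSeedL opps (N : Int)) (vtClamp o.1 (N:Int)) (vtClamp o.2 (N:Int))
          + ((|y - vtClamp o.2 (N:Int)| : Int) : WithTop Int)
        ∈ (PySem.List.pyRange 0 (N:Int) 1).map
            (fun j => lk (vtSeedL opps (N : Int)) (vtClamp o.1 (N:Int)) j + ((|y - j| : Int) : WithTop Int)) :=
      List.mem_map.2 ⟨vtClamp o.2 (N:Int), PySem.List.mem_pyRange_one.2 ⟨hc2.1, hc2.2⟩, rfl⟩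
    have hseedle : lk (vtSeedL opps (N : Int)) (vtClamp o.1 (N:Int)) (vtClamp o.2 (N:Int))
        ≤ ((|o.1 - vtClamp o.1 (N:Int)| + |o.2 - vtClamp o.2 (N:Int)| : Int) : WithTop Int) := by
      rw [vtSeedL_spec opps (N : Int) (by omega) _ _ hc1.1 hc1.2 hc2.1 hc2.2]
      have hmem0 : (if ((vtClamp o.1 (N:Int), vtClamp o.2 (N:Int)) : Int × Int) = (vtClamp o.1 (N:Int), vtClamp o.2 (N:Int))
            then ((|o.1 - vtClamp o.1 (N:Int)| + |o.2 - vtClamp o.2 (N:Int)| : Int) : WithTop Int) else ⊤)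
          ∈ opps.map (fun o' =>
            if ((vtClamp o.1 (N:Int), vtClamp o.2 (N:Int)) : Int × Int) = (vtClamp o'.1 (N:Int), vtClamp o'.2 (N:Int))
            then ((|o'.1 - vtClamp o'.1 (N:Int)| + |o'.2 - vtClamp o'.2 (N:Int)| : Int) : WithTop Int)
            else ⊤) := List.mem_map_of_mem hoo
      have h5 := wmin_le_of_mem hmem0
      rw [if_pos rfl] at h5
      exact h5
    calc wmin ((PySem.List.pyRange 0 (N:Int) 1).map
            (fun j => lk (vtSeedL opps (N : Int)) (vtClamp o.1 (N:Int)) j + ((|y - j| : Int) : WithTop Int)))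
            + ((|x - vtClamp o.1 (N:Int)| : Int) : WithTop Int)
        ≤ (lk (vtSeedL opps (N : Int)) (vtClamp o.1 (N:Int)) (vtClamp o.2 (N:Int))
            + ((|y - vtClamp o.2 (N:Int)| : Int) : WithTop Int))
            + ((|x - vtClamp o.1 (N:Int)| : Int) : WithTop Int) :=
          add_le_add (wmin_le_of_mem hmm) (le_refl _)
      _ ≤ (((|o.1 - vtClamp o.1 (N:Int)| + |o.2 - vtClamp o.2 (N:Int)| : Int) : WithTop Int)
            + ((|y - vtClamp o.2 (N:Int)| : Int) : WithTop Int))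
            + ((|x - vtClamp o.1 (N:Int)| : Int) : WithTop Int) :=
          add_le_add (add_le_add hseedle (le_refl _)) (le_refl _)
      _ = ((|x - o.1| + |y - o.2| : Int) : WithTop Int) := by
          rw [← WithTop.coe_add, ← WithTop.coe_add, WithTop.coe_inj]
          have e1 := vtClamp_abs o.1 x (N:Int) hx0 hx1
          have e2 := vtClamp_abs o.2 y (N:Int) hy0 hy1
          linarith

theorem foldl_min_wmin (t : List Int) (a : Int) :
    ((t.foldl min a : Int) : WithTop Int) = wmin ((a :: t).map (fun v => ((v : Int) : WithTop Int))) := by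
  induction t generalizing a with
  | nil =>
    rw [List.foldl_nil, List.map_cons, List.map_nil, wmin_cons, wmin_nil, min_eq_left le_top]
  | cons b t ih =>
    rw [List.foldl_cons, ih]
    rw [List.map_cons, List.map_cons, List.map_cons, wmin_cons, wmin_cons, wmin_cons]
    rw [← min_assoc, WithTop.coe_min]

theorem min_getD_wmin (l : List Int) (hl : l ≠ []) :
    (((PySem.List.min? l (fun v => v)).getD 0 : Int) : WithTop Int)
      = wmin (l.map (fun v => ((v : Int) : WithTop Int))) := by
  obtain ⟨a, t, rfl⟩ := List.exists_cons_of_ne_nil hl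
  rw [PySem.List.min?_id_cons, Option.getD_some, foldl_min_wmin]

-- ===== VERDICT (by name: the statement is the Claim_ definition above) =====
theorem voronoi_territory_spec : Claim_equal_voronoi_territory := by
  intro mp opps board n _
  unfold Spec_voronoi_territory voronoi_territory voronoi_territory_alt
  by_cases ho : opps = []
  · rw [if_pos ho, if_pos ho, flood_fill_area_B_eq]
  rw [if_neg ho, if_neg ho]
  by_cases hn : n ≤ 0
  · rw [if_pos hn, PySem.List.pyRange_one_eq_nil hn, List.foldl_nil]
  rw [if_neg hn]
  obtain ⟨N, rfl⟩ : ∃ N : Nat, n = (N : Int) :=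
    ⟨n.toNat, (Int.toNat_of_nonneg (by omega)).symm⟩
  apply PySem.List.foldl_congr_mem
  intro t x hx
  apply PySem.List.foldl_congr_mem
  intro s y hy
  have hxb := PySem.List.mem_pyRange_one.1 hx
  have hyb := PySem.List.mem_pyRange_one.1 hy
  dsimp only
  by_cases hb : (x, y) ∈ board
  · rw [if_pos hb, if_pos ((PySem.Set.mem_ofList board (x, y)).2 hb)]
  rw [if_neg hb, if_neg (fun h => hb ((PySem.Set.mem_ofList board (x, y)).1 h))]
  have hmap : opps.map (fun o => ((|x - o.1| + |y - o.2| : Int) : WithTop Int))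
      = (opps.map (fun o => |x - o.1| + |y - o.2|)).map (fun v => ((v : Int) : WithTop Int)) := by
    rw [List.map_map]; rfl
  have hfe : PySem.List.pyGetD (PySem.List.pyGetD ((PySem.List.pyRange 0 (N : Int) 1).map (fun y' =>
        transformRow (((vtSeedL opps (N : Int)).map transformRow).map (fun row => PySem.List.pyGetD row y' ⊤)))) y []) x ⊤
      = (((PySem.List.min? (opps.map (fun o => |x - o.1| + |y - o.2|)) (fun v => v)).getD 0 : Int) : WithTop Int) := by
    show lk _ y x = _
    rw [fieldL_spec opps N (by omega) ho x y hxb.1 hxb.2 hyb.1 hyb.2, hmap,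
      min_getD_wmin _ (fun h => ho (List.map_eq_nil_iff.1 h))]
  by_cases hlt : |x - mp.1| + |y - mp.2|
      < (PySem.List.min? (opps.map (fun o => |x - o.1| + |y - o.2|)) (fun v => v)).getD 0
  · rw [if_pos hlt, if_pos (by rw [olt_iff, hfe]; exact WithTop.coe_lt_coe.2 hlt)]
  · rw [if_neg hlt, if_neg (by rw [olt_iff, hfe]; exact fun h => hlt (WithTop.coe_lt_coe.1 h))]
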